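-- pv_equiv track=rewrite | github.com/af4ro/ACM_Hackerrank_problem | ACM_W2.py | number_needed
-- ===== SOURCE A (Python) =====
-- def number_needed(a, b):
--     count = 0
--     i = 0
--     while i<len(a):
--         temp = b.find(a[i])
--         if (temp==-1):
--             # b = b[0:temp]+b[temp+1:]
--             if i!=len(a)-1:
--                 a = a[0:i] + a[i+1:]
--             else:
--                 a = a[0:i]
--             count+=1
--             continue
--         i+=1
--     j=0
--     while j <len(b):
--         temp = a.find(b[j])
--         if (temp == -1):
--             # a = a[0:temp] + a[temp + 1:]
--             if j != len(b) - 1: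
--                 b = b[0:j] + b[j + 1:]
--             else:
--                 b= b[0:j]
--             count += 1
--             continue
--         j+=1
--     return count
-- ===== SOURCE B (Python) =====
-- def number_needed(a, b):
--     only_a = set(a) - set(b)
--     only_b = set(b) - set(a)
--     return sum(a.count(c) for c in only_a) + sum(b.count(c) for c in only_b)
-- ===== Notes on version B (the rewrite author's own statement) =====
-- stated objective: simpler
-- what changed: A scans each string char by char, deleting absent chars in place via slicing and re-counting with a stalled index; B computes the two set differences once and sums per-distinct-character occurrence counts, with no mutation.
import Mathlib
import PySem

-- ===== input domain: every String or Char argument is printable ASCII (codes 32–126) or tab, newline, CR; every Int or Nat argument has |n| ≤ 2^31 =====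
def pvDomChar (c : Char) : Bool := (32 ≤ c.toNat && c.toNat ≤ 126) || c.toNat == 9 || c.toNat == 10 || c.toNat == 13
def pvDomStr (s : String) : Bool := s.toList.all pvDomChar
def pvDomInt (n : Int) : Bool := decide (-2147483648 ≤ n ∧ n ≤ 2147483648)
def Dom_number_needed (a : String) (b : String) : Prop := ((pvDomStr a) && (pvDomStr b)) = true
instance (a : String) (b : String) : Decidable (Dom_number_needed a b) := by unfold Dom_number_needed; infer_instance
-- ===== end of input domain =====

-- B replaces A's in-place deletion scans by two set differences plus per-distinct-character occurrence counts (objective: simpler).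

-- ===== PORT A =====
-- termination fact cited by the ports' decreasing_by (kept as a named lemma so the definitions stay small)
theorem pvDecDel (xs : List Char) (i : Nat) (h : i < xs.length) :
    (if (i : Int) ≠ (xs.length : Int) - 1
       then PySem.List.slice xs (some ((0:Nat) : Int)) (some (i : Int)) ++ PySem.List.slice xs (some ((i+1 : Nat) : Int)) none
       else PySem.List.slice xs (some ((0:Nat) : Int)) (some (i : Int))).length - i < xs.length - i := by
  split
  · rw [PySem.List.slice_natCast, PySem.List.slice_from_natCast]; simp; omega
  · rw [PySem.List.slice_natCast]; simp; omega

-- first while loop: walk a, deleting (and counting) chars of a absent from b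
def pvLoopA (b a : List Char) (i : Nat) (count : Int) : List Char × Int :=
  if h : i < a.length then
    let temp := PySem.Chars.find b [a[i]]
    if temp = -1 then
      pvLoopA b
        (if (i : Int) ≠ (a.length : Int) - 1
           then PySem.List.slice a (some ((0:Nat) : Int)) (some (i : Int)) ++ PySem.List.slice a (some ((i+1 : Nat) : Int)) none
           else PySem.List.slice a (some ((0:Nat) : Int)) (some (i : Int)))
        i (count + 1)
    else pvLoopA b a (i + 1) count
  else (a, count)
termination_by a.length - i
decreasing_by
  · simp only [dite_eq_ite]
    exact pvDecDel a i h
  · exact Nat.sub_succ_lt_self a.length i h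

-- second while loop: walk b, deleting (and counting) chars of b absent from the (already-filtered) a
def pvLoopB (a b : List Char) (j : Nat) (count : Int) : Int :=
  if h : j < b.length then
    let temp := PySem.Chars.find a [b[j]]
    if temp = -1 then
      pvLoopB a
        (if (j : Int) ≠ (b.length : Int) - 1
           then PySem.List.slice b (some ((0:Nat) : Int)) (some (j : Int)) ++ PySem.List.slice b (some ((j+1 : Nat) : Int)) none
           else PySem.List.slice b (some ((0:Nat) : Int)) (some (j : Int)))
        j (count + 1)
    else pvLoopB a b (j + 1) count
  else count
termination_by b.length - j
decreasing_by
  · simp only [dite_eq_ite]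
    exact pvDecDel b j h
  · exact Nat.sub_succ_lt_self b.length j h

def number_needed (a : String) (b : String) : Int :=
  let r := pvLoopA b.toList a.toList 0 0
  pvLoopB r.1 b.toList 0 r.2

-- ===== PORT B =====
def number_needed_alt (a : String) (b : String) : Int :=
  let al := a.toList
  let bl := b.toList
  let onlyA := PySem.Set.diff (PySem.Set.ofList al) (PySem.Set.ofList bl)
  let onlyB := PySem.Set.diff (PySem.Set.ofList bl) (PySem.Set.ofList al)
  (onlyA.map (fun c => (al.count c : Int))).sum + (onlyB.map (fun c => (bl.count c : Int))).sum

-- ===== PRECONDITION & SPEC =====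
def Spec_number_needed (a : String) (b : String) (out : Int) : Prop := out = number_needed_alt a b
instance (a : String) (b : String) (out : Int) : Decidable (Spec_number_needed a b out) := by unfold Spec_number_needed; infer_instance

-- ===== CLAIM (what is proved, stated in full; the proofs are below) =====
def Claim_equal_number_needed : Prop := ∀ (a : String) (b : String), Dom_number_needed a b → Spec_number_needed a b (number_needed a b)

-- ===== LEMMAS AND PROOFS =====

-- A's find(a[i]) == -1 test is "a[i] not in b"
theorem pvFind_neg (b : List Char) (c : Char) :
    (PySem.Chars.find b [c] = -1) ↔ ¬ c ∈ b := by
  rw [PySem.Chars.find_eq_neg_one_iff, List.singleton_infix_iff]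

-- the deletion expression `a[0:i] + a[i+1:]` / `a[0:i]` is take i ++ drop (i+1)
theorem pvDelEq (a : List Char) (i : Nat) (h : i < a.length) :
    (if (i : Int) ≠ (a.length : Int) - 1
       then PySem.List.slice a (some ((0:Nat) : Int)) (some (i : Int)) ++ PySem.List.slice a (some ((i+1 : Nat) : Int)) none
       else PySem.List.slice a (some ((0:Nat) : Int)) (some (i : Int)))
      = a.take i ++ a.drop (i+1) := by
  rw [PySem.List.slice_natCast, PySem.List.slice_from_natCast]
  split_ifs with hne
  · simp
  · have hlen : i + 1 = a.length := by omega
    simp [hlen]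

theorem pvLoopA_spec (b a : List Char) (i : Nat) (count : Int) :
    pvLoopA b a i count
      = (a.take i ++ (a.drop i).filter (fun c => decide (c ∈ b)),
         count + ((a.drop i).countP (fun c => !decide (c ∈ b)) : Int)) := by
  fun_induction pvLoopA with
  | case1 a i count h temp htemp ih =>
      simp only [dite_eq_ite] at ih
      rw [pvDelEq a i h] at ih
      rw [pvDelEq a i h]
      have hmem : ¬ a[i] ∈ b := (pvFind_neg b a[i]).1 htemp
      have htk : List.take i (a.take i ++ a.drop (i+1)) = a.take i :=
        List.take_left' (by simp; omega)
      have hdr : List.drop i (a.take i ++ a.drop (i+1)) = a.drop (i+1) :=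
        List.drop_left' (by simp; omega)
      rw [ih, htk, hdr, Prod.mk.injEq]
      have hd : a.drop i = a[i] :: a.drop (i+1) := List.drop_eq_getElem_cons h
      refine ⟨?_, ?_⟩
      · rw [hd, List.filter_cons]
        simp [hmem]
      · rw [hd, List.countP_cons]
        simp [hmem]
        omega
  | case2 a i count h temp htemp ih =>
      have hmem : a[i] ∈ b := by
        by_contra hc
        exact htemp ((pvFind_neg b a[i]).2 hc)
      have hd : a.drop i = a[i] :: a.drop (i+1) := List.drop_eq_getElem_cons h
      rw [ih, Prod.mk.injEq]
      refine ⟨?_, ?_⟩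
      · have ht : List.take (i+1) a = List.take i a ++ [a[i]] := by
          rw [List.take_add_one, List.getElem?_eq_getElem h]
          rfl
        rw [hd, List.filter_cons, ht, List.append_assoc]
        simp [hmem]
      · rw [hd, List.countP_cons]
        simp [hmem]
  | case3 a i count h =>
      rw [List.take_of_length_le (by omega), List.drop_of_length_le (by omega)]
      simp

theorem pvLoopB_spec (a b : List Char) (j : Nat) (count : Int) :
    pvLoopB a b j count
      = count + ((b.drop j).countP (fun c => !decide (c ∈ a)) : Int) := by
  fun_induction pvLoopB with
  | case1 b j count h temp htemp ih =>
      simp only [dite_eq_ite] at ih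
      rw [pvDelEq b j h] at ih
      rw [pvDelEq b j h]
      have hmem : ¬ b[j] ∈ a := (pvFind_neg a b[j]).1 htemp
      have hdr : List.drop j (b.take j ++ b.drop (j+1)) = b.drop (j+1) :=
        List.drop_left' (by simp; omega)
      rw [ih, hdr]
      have hd : b.drop j = b[j] :: b.drop (j+1) := List.drop_eq_getElem_cons h
      rw [hd, List.countP_cons]
      simp [hmem]
      omega
  | case2 b j count h temp htemp ih =>
      have hmem : b[j] ∈ a := by
        by_contra hc
        exact htemp ((pvFind_neg a b[j]).2 hc)
      have hd : b.drop j = b[j] :: b.drop (j+1) := List.drop_eq_getElem_cons h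
      rw [ih, hd, List.countP_cons]
      simp [hmem]
  | case3 b j count h =>
      rw [List.drop_of_length_le (by omega)]
      simp

-- sum of per-char occurrence counts over a nodup set d characterised by p = countP p
theorem pvSumCount (p : Char → Bool) (d : List Char) (hd : d.Nodup)
    (l : List Char) (hl : ∀ x ∈ l, (x ∈ d ↔ p x = true)) :
    (d.map (fun c => (l.count c : Int))).sum = (l.countP p : Int) := by
  induction l with
  | nil => simp
  | cons x l ih =>
      have hx := hl x (by simp)
      have hl' : ∀ y ∈ l, (y ∈ d ↔ p y = true) := fun y hy => hl y (by simp [hy])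
      have hstep : (d.map (fun c => ((x :: l).count c : Int))).sum
          = (d.map (fun c => (l.count c : Int) + (if (fun c => x == c) c = true then (1:Int) else 0))).sum := by
        refine congrArg List.sum (List.map_congr_left ?_)
        intro c _
        rw [List.count_cons]
        by_cases hxc : x = c <;> simp [hxc]
      rw [hstep, PySem.List.sum_map_add_int, ih hl', PySem.List.sum_map_ite_one_zero]
      have hcnt : d.countP (fun c => x == c) = d.count x := by
        unfold List.count
        refine List.countP_congr (fun y _ => ?_)
        by_cases hxy : x = y
        · simp [hxy]
        · simp [hxy, Ne.symm hxy]
      rw [List.countP_cons, hcnt]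
      by_cases hxd : x ∈ d
      · rw [List.count_eq_one_of_mem hd hxd]
        simp [hx.1 hxd]
      · rw [List.count_eq_zero.2 hxd]
        have hpx : p x = false := by
          by_contra hc
          exact hxd (hx.2 (by simpa using hc))
        simp [hpx]

-- ===== VERDICT (by name: the statement is the Claim_ definition above) =====
theorem number_needed_spec : Claim_equal_number_needed := by
  unfold Claim_equal_number_needed
  intro a b _
  show number_needed a b = number_needed_alt a b
  unfold number_needed number_needed_alt
  rw [pvLoopA_spec]
  simp only [List.take_zero, List.drop_zero, List.nil_append]
  rw [pvLoopB_spec]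
  have h1 : ((PySem.Set.diff (PySem.Set.ofList a.toList) (PySem.Set.ofList b.toList)).map
        (fun c => (a.toList.count c : Int))).sum
      = (a.toList.countP (fun c => !decide (c ∈ b.toList)) : Int) := by
    refine pvSumCount _ _ ((PySem.Set.nodup_ofList a.toList).filter _) _ ?_
    intro x hx
    simp only [List.mem_filter, PySem.Set.mem_ofList]
    constructor
    · rintro ⟨-, hq⟩
      simpa [List.contains_iff_mem, PySem.Set.mem_ofList] using hq
    · intro hq
      refine ⟨hx, ?_⟩
      simpa [List.contains_iff_mem, PySem.Set.mem_ofList] using hq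
  have h2 : ((PySem.Set.diff (PySem.Set.ofList b.toList) (PySem.Set.ofList a.toList)).map
        (fun c => (b.toList.count c : Int))).sum
      = (b.toList.countP
          (fun c => !decide (c ∈ a.toList.filter (fun c => decide (c ∈ b.toList)))) : Int) := by
    refine pvSumCount _ _ ((PySem.Set.nodup_ofList b.toList).filter _) _ ?_
    intro x hx
    simp only [List.mem_filter, PySem.Set.mem_ofList]
    constructor
    · rintro ⟨-, hq⟩
      have hxa : ¬ x ∈ a.toList := by
        simpa [List.contains_iff_mem, PySem.Set.mem_ofList] using hq
      simp [hxa]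
    · intro hq
      refine ⟨hx, ?_⟩
      have hxa : ¬ x ∈ a.toList := by
        intro hc
        simp [hc, hx] at hq
      simpa [List.contains_iff_mem, PySem.Set.mem_ofList] using hxa
  rw [h1, h2, List.drop_zero]
  omega
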